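-- pv_equiv track=rewrite | github.com/LovisoloPetaccio/Thesis | src/maximal_repeats.py | split_at_singletons
-- ===== SOURCE A (Python) =====
-- def get_singletons(w):
--   count = {}
--   for c in w:
--     if c not in count: count[c] = 0
--     count[c] = count[c] + 1
--   return {c for c in count if count[c] == 1}
--
-- def split_at_singletons(w):
--   singletons = [(c, w.index(c)) for c in get_singletons(w)]
--   singletons.sort(key = lambda ci: ci[1])  # Sorted array [(singleton, index)]
--   splits = []
--   for c, _ in singletons:
--     substring, tail = w.split(c)
--     if len(substring) > 0: splits.append(substring)
--     w = tail
--   if len(w) > 0: splits.append(w)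
--   return splits
-- ===== SOURCE B (Python) =====
-- def split_at_singletons(w):
--     count = {}
--     for c in w:
--         count[c] = count.get(c, 0) + 1
--     splits = []
--     buf = []
--     for c in w:
--         if count[c] == 1:
--             if buf:
--                 splits.append(''.join(buf))
--                 buf = []
--         else:
--             buf.append(c)
--     if buf:
--         splits.append(''.join(buf))
--     return splits
-- ===== Notes on version B (the rewrite author's own statement) =====
-- stated objective: alternative
-- what changed: Instead of building a singleton set, re-scanning with w.index, sorting by index, and repeatedly splitting the shrinking string, B counts characters once and emits the segments between unique-character positions in a single linear pass with a buffer.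
import Mathlib
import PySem

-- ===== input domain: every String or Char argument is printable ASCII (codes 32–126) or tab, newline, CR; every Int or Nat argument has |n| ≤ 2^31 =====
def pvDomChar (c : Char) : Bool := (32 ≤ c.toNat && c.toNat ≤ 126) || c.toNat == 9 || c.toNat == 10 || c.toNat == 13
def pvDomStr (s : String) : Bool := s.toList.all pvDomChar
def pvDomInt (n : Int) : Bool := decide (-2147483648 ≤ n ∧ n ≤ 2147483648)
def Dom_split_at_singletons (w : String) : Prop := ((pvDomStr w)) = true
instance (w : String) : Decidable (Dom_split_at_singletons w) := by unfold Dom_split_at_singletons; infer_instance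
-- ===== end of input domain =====

-- B replaces A's set-build + re-scan (w.index) + sort + repeated string splitting by one
-- character count and a single linear pass emitting buffered segments (objective: alternative).

-- ===== PORT A =====
def get_singletons (w : String) : PySem.Set Char :=
  let count : PySem.Dict Char Int := w.toList.foldl
    (fun d c =>
      let d := if d.contains c then d else d.insert c 0
      d.insert c (d.getD c 0 + 1)) PySem.Dict.empty
  -- {c for c in count if count[c] == 1}: a set built from the dict's keys (count[c] never misses)
  PySem.Set.ofList (count.keys.filter (fun c => count.getD c 0 == 1))

def split_at_singletons (w : String) : List String :=
  -- [(c, w.index(c)) for c in get_singletons(w)]; c ∈ w, so index = find (never raises)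
  let singletons := (get_singletons w).map (fun c => (c, PySem.Str.find w (String.singleton c)))
  let sortedS := PySem.List.sorted singletons (fun ci => ci.2)
  let res := sortedS.foldl (fun (st : List String × String) ci =>
    match PySem.Str.split? st.2 (String.singleton ci.1) with
    | some [substring, tail] =>
        ((if 0 < PySem.Str.len substring then st.1 ++ [substring] else st.1), tail)
    | _ => st   -- unreachable: ci.1 occurs exactly once in st.2, so split yields exactly two parts
    ) ([], w)
  if 0 < PySem.Str.len res.2 then res.1 ++ [res.2] else res.1

-- ===== PORT B =====
def split_at_singletons_alt (w : String) : List String :=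
  let count : PySem.Dict Char Int :=
    w.toList.foldl (fun d c => d.insert c (d.getD c 0 + 1)) PySem.Dict.empty
  -- single pass: flush the buffer at each unique character (count[c] never misses)
  let st := w.toList.foldl (fun (st : List String × List Char) c =>
      if count.getD c 0 == 1 then
        (if st.2.isEmpty then st.1 else st.1 ++ [String.ofList st.2], ([] : List Char))
      else (st.1, st.2 ++ [c])) ([], [])
  if st.2.isEmpty then st.1 else st.1 ++ [String.ofList st.2]

-- ===== PRECONDITION & SPEC =====
def Spec_split_at_singletons (w : String) (out : List String) : Prop := out = split_at_singletons_alt w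
instance (w : String) (out : List String) : Decidable (Spec_split_at_singletons w out) := by unfold Spec_split_at_singletons; infer_instance

-- ===== CLAIM (what is proved, stated in full; the proofs are below) =====
def Claim_equal_split_at_singletons : Prop := ∀ (w : String), Dom_split_at_singletons w → Spec_split_at_singletons w (split_at_singletons w)

-- ===== LEMMAS AND PROOFS =====
-- proof helpers
def aStep (st : List String × String) (c : Char) : List String × String :=
  match PySem.Str.split? st.2 (String.singleton c) with
  | some [substring, tail] =>
      ((if 0 < PySem.Str.len substring then st.1 ++ [substring] else st.1), tail)
  | _ => st

def bStep (p : Char → Bool) (st : List String × List Char) (c : Char) : List String × List Char :=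
  if p c then (if st.2.isEmpty then st.1 else st.1 ++ [String.ofList st.2], ([] : List Char))
  else (st.1, st.2 ++ [c])

def flushB (st : List String × List Char) : List String :=
  if st.2.isEmpty then st.1 else st.1 ++ [String.ofList st.2]

theorem go_miss (c x : Char) (rest cur : List Char) (acc : List (List Char)) (f : Nat)
    (hx : c ≠ x) :
    PySem.Chars.splitOn.go [c] (f+1) (x :: rest) cur acc = PySem.Chars.splitOn.go [c] f rest (x :: cur) acc := by
  rw [PySem.Chars.splitOn.go.eq_def]
  simp [List.isPrefixOf, hx]

theorem go_hit (c : Char) (rest cur : List Char) (acc : List (List Char)) (f : Nat) :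
    PySem.Chars.splitOn.go [c] (f+1) (c :: rest) cur acc = PySem.Chars.splitOn.go [c] f rest [] (cur.reverse :: acc) := by
  rw [PySem.Chars.splitOn.go.eq_def]
  simp [List.isPrefixOf]

theorem go_noMatch (c : Char) (fuel : Nat) (l cur : List Char) (acc : List (List Char))
    (h : c ∉ l) :
    PySem.Chars.splitOn.go [c] fuel l cur acc = ((cur.reverse ++ l) :: acc).reverse := by
  induction fuel generalizing l cur with
  | zero => rw [PySem.Chars.splitOn.go.eq_def]
  | succ f ih =>
    cases l with
    | nil => rw [PySem.Chars.splitOn.go.eq_def]; simp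
    | cons x rest =>
      simp only [List.mem_cons, not_or] at h
      rw [go_miss c x rest cur acc f h.1, ih rest (x :: cur) h.2]
      simp

theorem go_skip (c : Char) (pre : List Char) (fuel : Nat) (rest cur : List Char) (acc : List (List Char))
    (hpre : c ∉ pre) (hf : pre.length < fuel) :
    PySem.Chars.splitOn.go [c] fuel (pre ++ c :: rest) cur acc =
      PySem.Chars.splitOn.go [c] (fuel - (pre.length + 1)) rest [] ((cur.reverse ++ pre) :: acc) := by
  induction pre generalizing fuel cur with
  | nil =>
    cases fuel with
    | zero => omega
    | succ f => rw [List.nil_append, go_hit]; simp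
  | cons x ps ih =>
    cases fuel with
    | zero => omega
    | succ f =>
      simp only [List.mem_cons, not_or] at hpre
      rw [List.cons_append, go_miss c x _ cur acc f hpre.1]
      rw [ih f (x :: cur) hpre.2 (by simpa using Nat.lt_of_succ_lt_succ hf)]
      simp only [List.reverse_cons, List.append_assoc, List.singleton_append, List.length_cons]
      have h2 : f + 1 - (ps.length + 1 + 1) = f - (ps.length + 1) := by omega
      rw [h2]

theorem splitOn_single (c : Char) (pre rest : List Char) (h1 : c ∉ pre) (h2 : c ∉ rest) :
    PySem.Chars.splitOn (pre ++ c :: rest) [c] = [pre, rest] := by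
  unfold PySem.Chars.splitOn
  rw [go_skip c pre _ rest [] [] h1 (by simp)]
  rw [go_noMatch c _ rest [] _ h2]
  simp

theorem idxOf_eq_of (l : List Char) (c : Char) (k : Nat)
    (hk : l[k]? = some c) (hmin : ∀ i < k, l[i]? ≠ some c) : l.idxOf c = k := by
  induction l generalizing k with
  | nil => simp at hk
  | cons x xs ih =>
    cases k with
    | zero =>
      simp at hk
      simp [hk, List.idxOf_cons_self]
    | succ j =>
      have hx : ¬ x = c := by
        have := hmin 0 (Nat.succ_pos j)
        simpa using this
      rw [List.idxOf_cons_ne _ hx]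
      rw [ih j (by simpa using hk) (fun i hi => by simpa using hmin (i+1) (by omega))]

theorem find_singleton (l : List Char) (c : Char) (h : c ∈ l) :
    PySem.Chars.find l [c] = (l.idxOf c : Int) := by
  have hinf : [c] <:+: l := by
    obtain ⟨s, t, rfl⟩ := List.append_of_mem h
    exact ⟨s, t, by simp⟩
  have h0 : 0 ≤ PySem.Chars.find l [c] := (PySem.Chars.find_nonneg_iff l [c]).mpr hinf
  obtain ⟨hpre, hmin⟩ := PySem.Chars.find_spec h0
  have hk : l[(PySem.Chars.find l [c]).toNat]? = some c := by
    obtain ⟨t, ht⟩ := hpre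
    rw [← List.head?_drop, ← ht]
    simp
  have hm : ∀ i < (PySem.Chars.find l [c]).toNat, l[i]? ≠ some c := by
    intro i hi hic
    apply hmin i hi
    rw [← List.head?_drop] at hic
    cases hd : l.drop i with
    | nil => rw [hd] at hic; simp at hic
    | cons y ys =>
      rw [hd] at hic
      simp at hic
      exact ⟨ys, by simp [hic]⟩
  rw [idxOf_eq_of l c _ hk hm]
  omega

theorem pw_ofList (l : List Char) :
    (PySem.Set.ofList l).Pairwise (fun a b => l.idxOf a < l.idxOf b) := by
  induction l with
  | nil => simp [PySem.Set.ofList]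
  | cons x xs ih =>
    rw [PySem.Set.ofList_cons]
    constructor
    · intro b hb
      have hbm := ((PySem.Set.mem_discard _ _ _).mp hb)
      have hbx : ¬ x = b := fun h => hbm.2 h.symm
      rw [List.idxOf_cons_self, List.idxOf_cons_ne _ hbx]
      omega
    · have hsub : (PySem.Set.discard (PySem.Set.ofList xs) x).Sublist (PySem.Set.ofList xs) :=
        List.filter_sublist
      refine List.Pairwise.imp_of_mem ?_ (List.Pairwise.sublist hsub ih)
      intro a b ha hb hab
      have hax : ¬ x = a := fun h => ((PySem.Set.mem_discard _ _ _).mp ha).2 h.symm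
      have hbx : ¬ x = b := fun h => ((PySem.Set.mem_discard _ _ _).mp hb).2 h.symm
      rw [List.idxOf_cons_ne _ hax, List.idxOf_cons_ne _ hbx]
      omega

theorem filt_ofList (l : List Char) (q : Char → Bool)
    (hq : ∀ c ∈ l, q c = true → l.count c = 1) :
    l.filter q = (PySem.Set.ofList l).filter q := by
  induction l with
  | nil => simp [PySem.Set.ofList]
  | cons x xs ih =>
    have hxs : ∀ c ∈ xs, q c = true → xs.count c = 1 := by
      intro c hc hqc
      have h1 := hq c (List.mem_cons_of_mem _ hc) hqc
      have h2 : 1 ≤ xs.count c := List.one_le_count_iff.mpr hc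
      have h3 : xs.count c ≤ (x :: xs).count c := by
        rw [List.count_cons]; omega
      omega
    rw [PySem.Set.ofList_cons]
    by_cases hqx : q x = true
    · have hx1 : (x :: xs).count x = 1 := hq x List.mem_cons_self hqx
      have hxnot : x ∉ xs := by
        rw [List.count_cons_self] at hx1
        exact fun h => by have := List.one_le_count_iff.mpr h; omega
      have hdis : PySem.Set.discard (PySem.Set.ofList xs) x = PySem.Set.ofList xs := by
        apply List.filter_eq_self.mpr
        intro a ha
        have : a ∈ xs := (PySem.Set.mem_ofList _ _).mp ha
        simp
        exact fun h => hxnot (h ▸ this)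
      rw [hdis, List.filter_cons_of_pos hqx, List.filter_cons_of_pos hqx, ih hxs]
    · have hqx' : q x = false := by simpa using hqx
      rw [List.filter_cons_of_neg (by simp [hqx']), List.filter_cons_of_neg (by simp [hqx'])]
      rw [ih hxs]
      unfold PySem.Set.discard
      rw [List.filter_filter]
      apply List.filter_congr
      intro a ha
      by_cases hqa : q a = true
      · have hax : ¬ (a == x) = true := by
          simp
          intro h
          rw [h] at hqa
          exact hqx hqa
        simp [hqa, hax]
      · simp [hqa]

def flushA (st : List String × String) : List String :=
  if 0 < PySem.Str.len st.2 then st.1 ++ [st.2] else st.1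

theorem split?_single (c : Char) (pre rest : List Char) (h1 : c ∉ pre) (h2 : c ∉ rest) :
    PySem.Str.split? (String.ofList (pre ++ c :: rest)) (String.singleton c) =
      some [String.ofList pre, String.ofList rest] := by
  unfold PySem.Str.split?
  rw [String.toList_ofList, String.toList_singleton]
  rw [PySem.Chars.split?]
  simp only [List.isEmpty_cons, if_false, Bool.false_eq_true]
  rw [splitOn_single c pre rest h1 h2]
  rfl

theorem b_skip (p : Char → Bool) (m : List Char) (acc : List String) (buf : List Char)
    (h : ∀ c ∈ m, p c = false) :
    m.foldl (bStep p) (acc, buf) = (acc, buf ++ m) := by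
  induction m generalizing buf with
  | nil => simp
  | cons x xs ih =>
    rw [List.foldl_cons]
    have hx : p x = false := h x List.mem_cons_self
    rw [show bStep p (acc, buf) x = (acc, buf ++ [x]) by simp [bStep, hx]]
    rw [ih (buf ++ [x]) (fun c hc => h c (List.mem_cons_of_mem _ hc))]
    simp

theorem main_loop (p : Char → Bool) (cs : List Char) (l : List Char) (acc : List String)
    (hcount : ∀ c ∈ cs, l.count c = 1)
    (hfilter : l.filter (fun c => decide (c ∈ cs)) = cs)
    (hcomplete : ∀ c ∈ l, p c = true → c ∈ cs)
    (hp : ∀ c ∈ cs, p c = true) :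
    flushA (cs.foldl aStep (acc, String.ofList l)) = flushB (l.foldl (bStep p) (acc, [])) := by
  induction cs generalizing l acc with
  | nil =>
    have hnone : ∀ c ∈ l, p c = false := by
      intro c hc
      cases hpc : p c with
      | false => rfl
      | true => exact absurd (hcomplete c hc hpc) (List.not_mem_nil)
    rw [List.foldl_nil, b_skip p l acc [] hnone]
    simp [flushA, flushB, PySem.Str.len]
    rcases l with _ | ⟨y, ys⟩ <;> simp
  | cons c cs' ih =>
    obtain ⟨pre, rest, rfl, hpre, hcmem, hrest⟩ := List.filter_eq_cons_iff.mp hfilter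
    have hcpre : c ∉ pre := by
      intro h
      exact hpre c h (by simpa using List.mem_cons_self)
    have hc1 : (pre ++ c :: rest).count c = 1 := hcount c List.mem_cons_self
    have hcrest : c ∉ rest := by
      intro h
      have := List.one_le_count_iff.mpr h
      rw [List.count_append, List.count_cons_self] at hc1
      omega
    -- A's step
    rw [List.foldl_cons]
    rw [show aStep (acc, String.ofList (pre ++ c :: rest)) c =
        ((if 0 < (pre.length : Int) then acc ++ [String.ofList pre] else acc), String.ofList rest) by
      unfold aStep
      rw [split?_single c pre rest hcpre hcrest]
      simp [PySem.Str.len]]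
    -- B's steps over pre and c
    rw [show (pre ++ c :: rest).foldl (bStep p) (acc, []) =
        rest.foldl (bStep p) ((if 0 < (pre.length : Int) then acc ++ [String.ofList pre] else acc), []) by
      rw [List.foldl_append, b_skip p pre acc []
        (fun x hx => by
          cases hpx : p x with
          | false => rfl
          | true =>
            exact absurd (hcomplete x (by simp [hx]) hpx)
              (fun hmem => hpre x hx (by simpa using hmem)))]
      rw [List.foldl_cons]
      have hpc : p c = true := hp c List.mem_cons_self
      simp only [List.nil_append, bStep, hpc, if_true]
      congr 1
      rcases pre with _ | ⟨y, ys⟩ <;> simp]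
    -- IH on rest
    apply ih
    · intro c' hc'
      have hmem : c' ∈ rest := by
        have h' := hc'
        rw [← hrest] at h'
        exact List.mem_of_mem_filter h'
      have h1 := hcount c' (List.mem_cons_of_mem _ hc')
      have h2 := List.one_le_count_iff.mpr hmem
      rw [List.count_append, List.count_cons] at h1
      omega
    · have heq : List.filter (fun x => decide (x ∈ cs')) rest
          = List.filter (fun x => decide (x ∈ c :: cs')) rest := by
        apply List.filter_congr
        intro x hx
        have hxc : ¬ x = c := fun h => hcrest (h ▸ hx)
        simp [List.mem_cons, hxc]
      rw [heq, hrest]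
    · intro x hx hpx
      have := hcomplete x (by simp [hx]) hpx
      have hxc : ¬ x = c := fun h => hcrest (h ▸ hx)
      simpa [hxc] using this
    · intro x hx
      exact hp x (List.mem_cons_of_mem _ hx)

theorem aCount_eq (l : List Char) :
    l.foldl (fun (d : PySem.Dict Char Int) c =>
        let d := if d.contains c then d else d.insert c 0
        d.insert c (d.getD c 0 + 1)) PySem.Dict.empty = PySem.Dict.counter l := by
  have hstep : (fun (d : PySem.Dict Char Int) c =>
      let d := if d.contains c then d else d.insert c 0
      d.insert c (d.getD c 0 + 1)) = (fun (d : PySem.Dict Char Int) c => d.insert c (d.getD c 0 + 1)) := by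
    funext d c
    by_cases h : d.contains c = true
    · simp [h]
    · simp only [Bool.not_eq_true] at h
      simp only [h, Bool.false_eq_true, if_false]
      rw [PySem.Dict.getD_insert_self, PySem.Dict.insert_insert_self,
        PySem.Dict.getD_of_not_contains _ _ h]
  rw [hstep, PySem.Dict.foldl_insert_getD_add_one_eq_counter]

theorem get_singletons_eq (w : String) :
    get_singletons w = (PySem.Set.ofList w.toList).filter (fun c => ((w.toList.count c : Int) == 1)) := by
  unfold get_singletons
  dsimp only
  rw [aCount_eq]
  have hkeys := PySem.Dict.keys_counter (κ := Char) w.toList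
  rw [hkeys]
  have hg : ∀ c, ((PySem.Dict.counter w.toList).getD c 0 == (1:Int)) = ((w.toList.count c : Int) == 1) := by
    intro c; rw [PySem.Dict.getD_counter]
  rw [List.filter_congr (fun c _ => hg c)]
  exact PySem.Set.ofList_eq_self_of_nodup _ (List.Nodup.filter _ (PySem.Set.nodup_ofList _))

theorem alt_eq (w : String) :
    split_at_singletons_alt w =
      flushB (w.toList.foldl (bStep (fun c => ((w.toList.count c : Int) == 1))) ([], [])) := by
  unfold split_at_singletons_alt
  dsimp only
  rw [PySem.Dict.foldl_insert_getD_add_one_eq_counter]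
  have hstep : (fun (st : List String × List Char) c =>
      if (PySem.Dict.counter w.toList).getD c 0 == (1:Int) then
        (if st.2.isEmpty then st.1 else st.1 ++ [String.ofList st.2], ([] : List Char))
      else (st.1, st.2 ++ [c])) = bStep (fun c => ((w.toList.count c : Int) == 1)) := by
    funext st c
    rw [bStep, PySem.Dict.getD_counter]
  rw [hstep]
  rfl

theorem ports_agree (w : String) : split_at_singletons w = split_at_singletons_alt w := by
  unfold split_at_singletons
  dsimp only
  rw [get_singletons_eq, alt_eq]
  set l := w.toList with hl
  set p : Char → Bool := fun c => ((l.count c : Int) == 1) with hp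
  set cs := (PySem.Set.ofList l).filter p with hcs
  have hmapeq : cs.map (fun c => (c, PySem.Str.find w (String.singleton c)))
      = cs.map (fun c => (c, (l.idxOf c : Int))) := by
    apply List.map_congr_left
    intro c hc
    have hcl : c ∈ l := (PySem.Set.mem_ofList _ _).mp (List.mem_of_mem_filter hc)
    have hfind : PySem.Str.find w (String.singleton c) = PySem.Chars.find l [c] := by
      simp [← hl]
    rw [hfind, find_singleton l c hcl]
  rw [hmapeq]
  have hpw : (cs.map (fun c => (c, (l.idxOf c : Int)))).Pairwise
      (fun (a b : Char × Int) => a.2 ≤ b.2) := by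
    rw [List.pairwise_map]
    have h1 : cs.Pairwise (fun a b => l.idxOf a < l.idxOf b) :=
      List.Pairwise.sublist List.filter_sublist (pw_ofList l)
    exact h1.imp (by intro a b h; simp; omega)
  rw [PySem.List.sorted_eq_self_of_pairwise _ _ hpw]
  rw [List.foldl_map]
  have hpc1 : ∀ c, p c = true → l.count c = 1 := by
    intro c hpc
    rw [hp] at hpc
    simp only [beq_iff_eq] at hpc
    exact_mod_cast hpc
  have hcount : ∀ c ∈ cs, l.count c = 1 := by
    intro c hc
    exact hpc1 c (List.of_mem_filter hc)
  have hfilter : l.filter (fun c => decide (c ∈ cs)) = cs := by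
    have h1 : l.filter (fun c => decide (c ∈ cs)) = l.filter p := by
      apply List.filter_congr
      intro x hx
      cases hpx : p x with
      | true =>
        simp only [decide_eq_true_eq]
        simp [hcs, List.mem_filter, (PySem.Set.mem_ofList l x).mpr hx, hpx]
      | false =>
        simp only [decide_eq_false_iff_not]
        simp [hcs, List.mem_filter, hpx]
    rw [h1, filt_ofList l p (fun c _ h => hpc1 c h), hcs]
  have hcomplete : ∀ c ∈ l, p c = true → c ∈ cs := by
    intro c hc hpc
    rw [hcs]
    exact List.mem_filter.mpr ⟨(PySem.Set.mem_ofList l c).mpr hc, hpc⟩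
  have hpall : ∀ c ∈ cs, p c = true := fun c hc => List.of_mem_filter hc
  have hm := main_loop p cs l [] hcount hfilter hcomplete hpall
  rw [String.ofList_toList] at hm
  exact hm

-- ===== VERDICT (by name: the statement is the Claim_ definition above) =====
theorem split_at_singletons_spec : Claim_equal_split_at_singletons := by
  unfold Claim_equal_split_at_singletons
  intro w _
  unfold Spec_split_at_singletons
  exact ports_agree w
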